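-- pv_equiv track=rewrite | github.com/HellanVin/Homework-6 | exercise3.py | remove_all_after
-- ===== SOURCE A (Python) =====
-- def remove_all_after(lst, n):
--     list = []
--     for i in lst:
--         if i <= n:
--             list.append(i)
--         else:
--             break
--     return list
-- ===== SOURCE B (Python) =====
-- def remove_all_after(lst, n):
--     idx = len(lst)
--     for k, x in enumerate(lst):
--         if x > n:
--             idx = k
--             break
--     return lst[:idx]
-- ===== Notes on version B (the rewrite author's own statement) =====
-- stated objective: alternative
-- what changed: B first finds the boundary index of the first element exceeding n (defaulting to len(lst)) and then returns the prefix with a single slice, instead of A's append-per-element loop with break.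
import Mathlib
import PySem

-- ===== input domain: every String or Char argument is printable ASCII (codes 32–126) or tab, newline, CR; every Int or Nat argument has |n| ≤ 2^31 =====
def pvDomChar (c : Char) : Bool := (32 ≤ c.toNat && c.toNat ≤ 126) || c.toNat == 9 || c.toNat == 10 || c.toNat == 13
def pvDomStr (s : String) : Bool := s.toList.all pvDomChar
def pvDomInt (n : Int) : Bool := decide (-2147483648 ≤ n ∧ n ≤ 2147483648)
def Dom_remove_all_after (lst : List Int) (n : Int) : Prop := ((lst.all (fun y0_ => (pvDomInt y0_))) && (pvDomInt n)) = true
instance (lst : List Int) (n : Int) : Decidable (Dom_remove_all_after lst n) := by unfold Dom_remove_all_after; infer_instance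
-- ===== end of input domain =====

-- B finds the boundary index of the first element > n, then returns the prefix by one slice;
-- A appends element by element and breaks. Same values everywhere (objective: alternative decomposition).

-- ===== PORT A =====
-- A's loop with break: recurse over lst carrying the accumulator `acc` (the Python `list`).
def remove_all_after_loop (n : Int) (acc : List Int) : List Int → List Int
  | [] => acc
  | i :: rest => if i ≤ n then remove_all_after_loop n (acc ++ [i]) rest else acc

def remove_all_after (lst : List Int) (n : Int) : List Int :=
  remove_all_after_loop n [] lst

-- ===== PORT B =====
-- boundary-finding pass: index of first element > n, default length (Python's enumerate loop).
def remove_all_after_bound (n : Int) : List Int → Nat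
  | [] => 0
  | x :: rest => if x > n then 0 else 1 + remove_all_after_bound n rest

def remove_all_after_alt (lst : List Int) (n : Int) : List Int :=
  PySem.List.slice lst none (some ((remove_all_after_bound n lst : Nat) : Int))

-- ===== PRECONDITION & SPEC =====
def Spec_remove_all_after (lst : List Int) (n : Int) (out : List Int) : Prop := out = remove_all_after_alt lst n
instance (lst : List Int) (n : Int) (out : List Int) : Decidable (Spec_remove_all_after lst n out) := by unfold Spec_remove_all_after; infer_instance

-- ===== CLAIM (what is proved, stated in full; the proofs are below) =====
def Claim_equal_remove_all_after : Prop := ∀ (lst : List Int) (n : Int), Dom_remove_all_after lst n → Spec_remove_all_after lst n (remove_all_after lst n)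

-- ===== LEMMAS AND PROOFS =====
theorem remove_all_after_loop_acc (n : Int) (acc : List Int) (lst : List Int) :
    remove_all_after_loop n acc lst = acc ++ remove_all_after_loop n [] lst := by
  induction lst generalizing acc with
  | nil => simp [remove_all_after_loop]
  | cons x rest ih =>
    by_cases h : x ≤ n
    · simp only [remove_all_after_loop, if_pos h]
      rw [ih, ih ([] ++ [x])]
      simp
    · simp [remove_all_after_loop, if_neg h]

theorem alt_take (lst : List Int) (n : Int) :
    remove_all_after_alt lst n = lst.take (remove_all_after_bound n lst) := by
  simp [remove_all_after_alt, PySem.List.slice_to_natCast]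

theorem remove_all_after_eq (lst : List Int) (n : Int) :
    remove_all_after lst n = remove_all_after_alt lst n := by
  rw [alt_take]
  induction lst with
  | nil => simp [remove_all_after, remove_all_after_loop, remove_all_after_bound]
  | cons x rest ih =>
    by_cases h : x ≤ n
    · simp only [remove_all_after, remove_all_after_loop, if_pos h, remove_all_after_bound,
        if_neg (by omega : ¬ x > n)]
      rw [remove_all_after_loop_acc]
      simp only [List.nil_append]
      rw [show (1 + remove_all_after_bound n rest) = remove_all_after_bound n rest + 1 by omega]
      simp [List.take_succ_cons]
      exact ih
    · simp [remove_all_after, remove_all_after_loop, if_neg h, remove_all_after_bound,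
        if_pos (by omega : x > n)]

-- ===== VERDICT (by name: the statement is the Claim_ definition above) =====
theorem remove_all_after_spec : Claim_equal_remove_all_after := by
  intro lst n _
  unfold Spec_remove_all_after
  exact remove_all_after_eq lst n
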